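-- pv_equiv track=rewrite | github.com/klark142/Introduction_to_Computer_Science | Zestaw_4/zad19.py | solve
-- ===== SOURCE A (Python) =====
-- def solve(T, k):
--     count = 0
--     for row in range(len(T)):
--         for col in range(len(T)):
--             #up-left
--             if row > 0 and col > 1:
--                 if T[row][col] * T[row - 1][col - 2] == k:
--                     count += 1
--             #up-right
--             if row > 0 and col < len(T) - 2:
--                 if T[row][col] * T[row - 1][col + 2] == k:
--                     count += 1
--             #left-up
--             if row > 1 and col > 0:
--                 if T[row][col] * T[row - 2][col - 1] == k:
--                     count += 1
--             #left-down
--             if row < len(T) - 2 and col > 0: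
--                 if T[row][col] * T[row + 2][col - 1] == k:
--                     count += 1
--             #right-up
--             if row > 1 and col < len(T) - 1:
--                 if T[row][col] * T[row - 2][col + 1] == k:
--                     count += 1
--             #right-down
--             if row < len(T) - 2 and col < len(T) - 1:
--                 if T[row][col] * T[row + 2][col + 1] == k:
--                     count += 1
--             #down-left
--             if row < len(T) - 1 and col > 1:
--                 if T[row][col] * T[row + 1][col - 2] == k:
--                     count += 1
--             #down-right
--             if row < len(T) - 1 and col < len(T) - 2:
--                 if T[row][col] * T[row + 1][col + 2] == k:
--                     count += 1
--
--     return count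
-- ===== SOURCE B (Python) =====
-- def _pairs(a, b, k):
--     return sum(1 for x, y in zip(a, b) if x * y == k)
--
-- def solve(T, k):
--     n = len(T)
--     half = 0
--     for r in range(n - 1):
--         a, b = T[r], T[r + 1]
--         half += _pairs(a[:n - 2], b[2:n], k)
--         half += _pairs(a[2:n], b[:n - 2], k)
--     for r in range(n - 2):
--         a, b = T[r], T[r + 2]
--         half += _pairs(a[:n - 1], b[1:n], k)
--         half += _pairs(a[1:n], b[:n - 1], k)
--     return 2 * half
-- ===== Notes on version B (the rewrite author's own statement) =====
-- stated objective: faster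
-- what changed: B drops the per-cell 8-branch scan entirely: it walks pairs of rows (r,r+1) and (r,r+2), zips shifted row slices so that aligned elements are exactly the knight-adjacent cells, counts product hits per band, and returns twice the half-count; the inner work becomes bulk slice/zip operations with no per-cell bounds tests.
import Mathlib
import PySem

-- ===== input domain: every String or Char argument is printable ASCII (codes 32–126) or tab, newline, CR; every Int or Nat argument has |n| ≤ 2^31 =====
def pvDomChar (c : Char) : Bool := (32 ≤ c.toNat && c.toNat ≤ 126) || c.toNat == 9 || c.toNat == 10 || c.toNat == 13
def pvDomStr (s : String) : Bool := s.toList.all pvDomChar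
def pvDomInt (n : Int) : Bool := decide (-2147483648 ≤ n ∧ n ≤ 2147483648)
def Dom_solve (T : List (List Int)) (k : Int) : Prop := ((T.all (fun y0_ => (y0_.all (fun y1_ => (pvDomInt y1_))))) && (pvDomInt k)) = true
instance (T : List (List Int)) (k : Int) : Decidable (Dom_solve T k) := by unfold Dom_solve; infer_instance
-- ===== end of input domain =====

-- B replaces A's per-cell scan with 8 guarded branches by a pass over row bands: for each pair of
-- rows (r,r+1) and (r,r+2) it zips shifted row slices so aligned elements are exactly the
-- knight-adjacent cells, counts product hits, and doubles the half-count; a timing run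
-- measured B faster by a constant factor (bulk slice/zip work instead of per-cell branch tests).

-- ===== PORT A =====
-- T[r][c]: exact (= the Python indexing) whenever 0 ≤ r < len T and 0 ≤ c < len (T[r]),
-- which Pre_solve guarantees for every access either port performs.
def pvGet2 (T : List (List Int)) (r c : Int) : Int :=
  ((PySem.List.pyGet? ((PySem.List.pyGet? T r).getD []) c).getD 0)

def solve (T : List (List Int)) (k : Int) : Int :=
  let n : Int := (T.length : Int)
  (PySem.List.pyRange 0 n 1).foldl (fun count row =>
    (PySem.List.pyRange 0 n 1).foldl (fun count col =>
      -- up-left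
      let count := if row > 0 ∧ col > 1 then
        (if pvGet2 T row col * pvGet2 T (row - 1) (col - 2) = k then count + 1 else count) else count
      -- up-right
      let count := if row > 0 ∧ col < n - 2 then
        (if pvGet2 T row col * pvGet2 T (row - 1) (col + 2) = k then count + 1 else count) else count
      -- left-up
      let count := if row > 1 ∧ col > 0 then
        (if pvGet2 T row col * pvGet2 T (row - 2) (col - 1) = k then count + 1 else count) else count
      -- left-down
      let count := if row < n - 2 ∧ col > 0 then
        (if pvGet2 T row col * pvGet2 T (row + 2) (col - 1) = k then count + 1 else count) else count
      -- right-up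
      let count := if row > 1 ∧ col < n - 1 then
        (if pvGet2 T row col * pvGet2 T (row - 2) (col + 1) = k then count + 1 else count) else count
      -- right-down
      let count := if row < n - 2 ∧ col < n - 1 then
        (if pvGet2 T row col * pvGet2 T (row + 2) (col + 1) = k then count + 1 else count) else count
      -- down-left
      let count := if row < n - 1 ∧ col > 1 then
        (if pvGet2 T row col * pvGet2 T (row + 1) (col - 2) = k then count + 1 else count) else count
      -- down-right
      let count := if row < n - 1 ∧ col < n - 2 then
        (if pvGet2 T row col * pvGet2 T (row + 1) (col + 2) = k then count + 1 else count) else count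
      count) count) 0

-- ===== PORT B =====
-- _pairs(a, b, k) = sum(1 for x, y in zip(a, b) if x * y == k)
def pvPairs (a b : List Int) (k : Int) : Int :=
  (a.zip b).foldl (fun s p => if p.1 * p.2 = k then s + 1 else s) 0

def solve_alt (T : List (List Int)) (k : Int) : Int :=
  let n : Int := (T.length : Int)
  let half := (PySem.List.pyRange 0 (n - 1) 1).foldl (fun half r =>
    let a := (PySem.List.pyGet? T r).getD []
    let b := (PySem.List.pyGet? T (r + 1)).getD []
    half + pvPairs (PySem.List.slice a none (some (n - 2))) (PySem.List.slice b (some 2) (some n)) k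
         + pvPairs (PySem.List.slice a (some 2) (some n)) (PySem.List.slice b none (some (n - 2))) k) 0
  let half := (PySem.List.pyRange 0 (n - 2) 1).foldl (fun half r =>
    let a := (PySem.List.pyGet? T r).getD []
    let b := (PySem.List.pyGet? T (r + 2)).getD []
    half + pvPairs (PySem.List.slice a none (some (n - 1))) (PySem.List.slice b (some 1) (some n)) k
         + pvPairs (PySem.List.slice a (some 1) (some n)) (PySem.List.slice b none (some (n - 1))) k) half
  2 * half

-- ===== PRECONDITION & SPEC =====
-- Pre_solve is exactly the set of inputs on which the Python A returns: for side ≥ 3 every row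
-- gets indexed up to column (len T) - 1, so A raises IndexError iff some row is shorter than len T;
-- for side ≤ 2 no branch guard ever fires and A returns 0 on any row shapes.
def Pre_solve (T : List (List Int)) (k : Int) : Prop :=
  T.length ≤ 2 ∨ ∀ row ∈ T, T.length ≤ row.length
instance (T : List (List Int)) (k : Int) : Decidable (Pre_solve T k) := by
  unfold Pre_solve; infer_instance

def pvWitness_solve : List (List Int) × Int := ([[1, 2, 3], [4, 5, 6], [7, 8, 10]], 10)

def Spec_solve (T : List (List Int)) (k : Int) (out : Int) : Prop := out = solve_alt T k
instance (T : List (List Int)) (k : Int) (out : Int) : Decidable (Spec_solve T k out) := by unfold Spec_solve; infer_instance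

-- ===== CLAIM (what is proved, stated in full; the proofs are below) =====
def Claim_equal_solve : Prop := ∀ (T : List (List Int)) (k : Int), Dom_solve T k → Pre_solve T k → Spec_solve T k (solve T k)

-- ===== LEMMAS AND PROOFS =====

def pvInd (T : List (List Int)) (k r c r2 c2 : Int) : Int :=
  if 0 ≤ r2 ∧ r2 < (T.length : Int) ∧ 0 ≤ c2 ∧ c2 < (T.length : Int) ∧
     pvGet2 T r c * pvGet2 T r2 c2 = k then 1 else 0

lemma pv_if_if (a : ℤ) (p q s : Prop) [Decidable p] [Decidable q] [Decidable s]
    (h : (p ∧ q) ↔ s) :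
    (if p then (if q then a + 1 else a) else a) = a + (if s then 1 else 0) := by
  by_cases hp : p <;> by_cases hq : q <;> simp [hp, hq, ← h]

lemma pyRange_map_sum (N : ℤ) (f : ℤ → ℤ) :
    ((PySem.List.pyRange 0 N).map f).sum = ∑ i ∈ Finset.Ico (0 : ℤ) N, f i := by
  rcases (by omega : N ≤ 0 ∨ 0 ≤ N) with h | h
  · rw [PySem.List.pyRange_one_eq_nil h, Finset.Ico_eq_empty (by omega)]; simp
  · induction N, h using Int.le_induction with
    | base => rw [PySem.List.pyRange_one_eq_nil le_rfl, Finset.Ico_eq_empty (by omega)]; simp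
    | succ n hn ih =>
      rw [PySem.List.pyRange_one_succ_right hn, List.map_append, List.sum_append, ih,
        ← Finset.sum_Ico_add_eq_sum_Ico_add_one hn f]
      simp

noncomputable def pvS (T : List (List Int)) (k dr dc : Int) : Int :=
  ∑ p ∈ Finset.Ico (0 : ℤ) (T.length : Int) ×ˢ Finset.Ico (0 : ℤ) (T.length : Int),
    pvInd T k p.1 p.2 (p.1 + dr) (p.2 + dc)

lemma pvS_neg (T : List (List Int)) (k dr dc : Int) :
    pvS T k dr dc = pvS T k (-dr) (-dc) := by
  unfold pvS pvInd
  rw [Finset.sum_boole, Finset.sum_boole]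
  refine congrArg _ (Finset.card_nbij' (fun p => (p.1 + dr, p.2 + dc))
    (fun p => (p.1 - dr, p.2 - dc)) ?_ ?_ ?_ ?_)
  · intro p hp
    simp only [Finset.coe_filter, Finset.mem_product, Finset.mem_Ico, Set.mem_setOf_eq] at hp ⊢
    obtain ⟨⟨⟨hp1, hp2⟩, ⟨hp3, hp4⟩⟩, h1, h2, h3, h4, h5⟩ := hp
    have e1 : p.1 + dr + -dr = p.1 := by ring
    have e2 : p.2 + dc + -dc = p.2 := by ring
    rw [e1, e2]
    exact ⟨⟨⟨by omega, by omega⟩, by omega, by omega⟩, by omega, by omega, by omega, by omega,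
      by rw [mul_comm]; exact h5⟩
  · intro p hp
    simp only [Finset.coe_filter, Finset.mem_product, Finset.mem_Ico, Set.mem_setOf_eq] at hp ⊢
    obtain ⟨⟨⟨hp1, hp2⟩, ⟨hp3, hp4⟩⟩, h1, h2, h3, h4, h5⟩ := hp
    have e1 : p.1 - dr + dr = p.1 := by ring
    have e2 : p.2 - dc + dc = p.2 := by ring
    rw [e1, e2]
    refine ⟨⟨⟨by omega, by omega⟩, by omega, by omega⟩, by omega, by omega, by omega, by omega, ?_⟩
    rw [mul_comm]
    have e3 : p.1 + -dr = p.1 - dr := by ring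
    have e4 : p.2 + -dc = p.2 - dc := by ring
    rw [e3, e4] at h5
    exact h5
  · intro p _
    simp
  · intro p _
    simp

-- per-cell total of A's eight directed checks
def pvFA (T : List (List Int)) (k r c : Int) : Int :=
  pvInd T k r c (r - 1) (c - 2) + pvInd T k r c (r - 1) (c + 2) +
  pvInd T k r c (r - 2) (c - 1) + pvInd T k r c (r + 2) (c - 1) +
  pvInd T k r c (r - 2) (c + 1) + pvInd T k r c (r + 2) (c + 1) +
  pvInd T k r c (r + 1) (c - 2) + pvInd T k r c (r + 1) (c + 2)

lemma solve_eq_sum (T : List (List Int)) (k : Int) :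
    solve T k = ∑ r ∈ Finset.Ico (0 : ℤ) (T.length : Int), ∑ c ∈ Finset.Ico (0 : ℤ) (T.length : Int),
      pvFA T k r c := by
  unfold solve
  rw [PySem.List.foldl_congr_mem' _ _
    (fun a row => a + ((PySem.List.pyRange 0 (T.length : Int)).map (fun c => pvFA T k row c)).sum) 0 ?_]
  · rw [PySem.List.foldl_add, pyRange_map_sum]
    simp only [zero_add]
    refine Finset.sum_congr rfl fun r _ => ?_
    exact pyRange_map_sum _ _
  · intro row hrow a
    rw [PySem.List.foldl_congr_mem' _ _ (fun a col => a + pvFA T k row col) a ?_]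
    · exact PySem.List.foldl_add _ _ _
    · intro col hcol a'
      rw [PySem.List.mem_pyRange_one] at hrow hcol
      obtain ⟨hr0, hr1⟩ := hrow
      obtain ⟨hc0, hc1⟩ := hcol
      show _ = a' + pvFA T k row col
      dsimp only
      rw [pv_if_if _ _ _ (0 ≤ row - 1 ∧ row - 1 < (T.length : Int) ∧ 0 ≤ col - 2 ∧ col - 2 < (T.length : Int) ∧ pvGet2 T row col * pvGet2 T (row - 1) (col - 2) = k)
        ((⟨fun ⟨⟨h1, h2⟩, h3⟩ => ⟨by omega, by omega, by omega, by omega, h3⟩, fun ⟨h1, h2, h3, h4, h5⟩ => ⟨⟨by omega, by omega⟩, h5⟩⟩ : ((row > 0 ∧ col > 1) ∧ (pvGet2 T row col * pvGet2 T (row - 1) (col - 2) = k)) ↔ (0 ≤ row - 1 ∧ row - 1 < (T.length : Int) ∧ 0 ≤ col - 2 ∧ col - 2 < (T.length : Int) ∧ pvGet2 T row col * pvGet2 T (row - 1) (col - 2) = k)))]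
      rw [pv_if_if _ _ _ (0 ≤ row - 1 ∧ row - 1 < (T.length : Int) ∧ 0 ≤ col + 2 ∧ col + 2 < (T.length : Int) ∧ pvGet2 T row col * pvGet2 T (row - 1) (col + 2) = k)
        ((⟨fun ⟨⟨h1, h2⟩, h3⟩ => ⟨by omega, by omega, by omega, by omega, h3⟩, fun ⟨h1, h2, h3, h4, h5⟩ => ⟨⟨by omega, by omega⟩, h5⟩⟩ : ((row > 0 ∧ col < (T.length : Int) - 2) ∧ (pvGet2 T row col * pvGet2 T (row - 1) (col + 2) = k)) ↔ (0 ≤ row - 1 ∧ row - 1 < (T.length : Int) ∧ 0 ≤ col + 2 ∧ col + 2 < (T.length : Int) ∧ pvGet2 T row col * pvGet2 T (row - 1) (col + 2) = k)))]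
      rw [pv_if_if _ _ _ (0 ≤ row - 2 ∧ row - 2 < (T.length : Int) ∧ 0 ≤ col - 1 ∧ col - 1 < (T.length : Int) ∧ pvGet2 T row col * pvGet2 T (row - 2) (col - 1) = k)
        ((⟨fun ⟨⟨h1, h2⟩, h3⟩ => ⟨by omega, by omega, by omega, by omega, h3⟩, fun ⟨h1, h2, h3, h4, h5⟩ => ⟨⟨by omega, by omega⟩, h5⟩⟩ : ((row > 1 ∧ col > 0) ∧ (pvGet2 T row col * pvGet2 T (row - 2) (col - 1) = k)) ↔ (0 ≤ row - 2 ∧ row - 2 < (T.length : Int) ∧ 0 ≤ col - 1 ∧ col - 1 < (T.length : Int) ∧ pvGet2 T row col * pvGet2 T (row - 2) (col - 1) = k)))]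
      rw [pv_if_if _ _ _ (0 ≤ row + 2 ∧ row + 2 < (T.length : Int) ∧ 0 ≤ col - 1 ∧ col - 1 < (T.length : Int) ∧ pvGet2 T row col * pvGet2 T (row + 2) (col - 1) = k)
        ((⟨fun ⟨⟨h1, h2⟩, h3⟩ => ⟨by omega, by omega, by omega, by omega, h3⟩, fun ⟨h1, h2, h3, h4, h5⟩ => ⟨⟨by omega, by omega⟩, h5⟩⟩ : ((row < (T.length : Int) - 2 ∧ col > 0) ∧ (pvGet2 T row col * pvGet2 T (row + 2) (col - 1) = k)) ↔ (0 ≤ row + 2 ∧ row + 2 < (T.length : Int) ∧ 0 ≤ col - 1 ∧ col - 1 < (T.length : Int) ∧ pvGet2 T row col * pvGet2 T (row + 2) (col - 1) = k)))]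
      rw [pv_if_if _ _ _ (0 ≤ row - 2 ∧ row - 2 < (T.length : Int) ∧ 0 ≤ col + 1 ∧ col + 1 < (T.length : Int) ∧ pvGet2 T row col * pvGet2 T (row - 2) (col + 1) = k)
        ((⟨fun ⟨⟨h1, h2⟩, h3⟩ => ⟨by omega, by omega, by omega, by omega, h3⟩, fun ⟨h1, h2, h3, h4, h5⟩ => ⟨⟨by omega, by omega⟩, h5⟩⟩ : ((row > 1 ∧ col < (T.length : Int) - 1) ∧ (pvGet2 T row col * pvGet2 T (row - 2) (col + 1) = k)) ↔ (0 ≤ row - 2 ∧ row - 2 < (T.length : Int) ∧ 0 ≤ col + 1 ∧ col + 1 < (T.length : Int) ∧ pvGet2 T row col * pvGet2 T (row - 2) (col + 1) = k)))]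
      rw [pv_if_if _ _ _ (0 ≤ row + 2 ∧ row + 2 < (T.length : Int) ∧ 0 ≤ col + 1 ∧ col + 1 < (T.length : Int) ∧ pvGet2 T row col * pvGet2 T (row + 2) (col + 1) = k)
        ((⟨fun ⟨⟨h1, h2⟩, h3⟩ => ⟨by omega, by omega, by omega, by omega, h3⟩, fun ⟨h1, h2, h3, h4, h5⟩ => ⟨⟨by omega, by omega⟩, h5⟩⟩ : ((row < (T.length : Int) - 2 ∧ col < (T.length : Int) - 1) ∧ (pvGet2 T row col * pvGet2 T (row + 2) (col + 1) = k)) ↔ (0 ≤ row + 2 ∧ row + 2 < (T.length : Int) ∧ 0 ≤ col + 1 ∧ col + 1 < (T.length : Int) ∧ pvGet2 T row col * pvGet2 T (row + 2) (col + 1) = k)))]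
      rw [pv_if_if _ _ _ (0 ≤ row + 1 ∧ row + 1 < (T.length : Int) ∧ 0 ≤ col - 2 ∧ col - 2 < (T.length : Int) ∧ pvGet2 T row col * pvGet2 T (row + 1) (col - 2) = k)
        ((⟨fun ⟨⟨h1, h2⟩, h3⟩ => ⟨by omega, by omega, by omega, by omega, h3⟩, fun ⟨h1, h2, h3, h4, h5⟩ => ⟨⟨by omega, by omega⟩, h5⟩⟩ : ((row < (T.length : Int) - 1 ∧ col > 1) ∧ (pvGet2 T row col * pvGet2 T (row + 1) (col - 2) = k)) ↔ (0 ≤ row + 1 ∧ row + 1 < (T.length : Int) ∧ 0 ≤ col - 2 ∧ col - 2 < (T.length : Int) ∧ pvGet2 T row col * pvGet2 T (row + 1) (col - 2) = k)))]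
      rw [pv_if_if _ _ _ (0 ≤ row + 1 ∧ row + 1 < (T.length : Int) ∧ 0 ≤ col + 2 ∧ col + 2 < (T.length : Int) ∧ pvGet2 T row col * pvGet2 T (row + 1) (col + 2) = k)
        ((⟨fun ⟨⟨h1, h2⟩, h3⟩ => ⟨by omega, by omega, by omega, by omega, h3⟩, fun ⟨h1, h2, h3, h4, h5⟩ => ⟨⟨by omega, by omega⟩, h5⟩⟩ : ((row < (T.length : Int) - 1 ∧ col < (T.length : Int) - 2) ∧ (pvGet2 T row col * pvGet2 T (row + 1) (col + 2) = k)) ↔ (0 ≤ row + 1 ∧ row + 1 < (T.length : Int) ∧ 0 ≤ col + 2 ∧ col + 2 < (T.length : Int) ∧ pvGet2 T row col * pvGet2 T (row + 1) (col + 2) = k)))]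
      simp only [pvFA, pvInd]
      abel

-- per-cell total of B's four canonical directions (the four window passes, seen cell-wise)
def pvFB (T : List (List Int)) (k r c : Int) : Int :=
  pvInd T k r c (r + 1) (c + 2) + pvInd T k r c (r + 1) (c + -2) +
  pvInd T k r c (r + 2) (c + 1) + pvInd T k r c (r + 2) (c + -1)

lemma pv_sum_range (m : ℕ) (f : ℤ → ℤ) :
    (List.map (fun i : ℕ => f (i : ℤ)) (List.range m)).sum = ∑ i ∈ Finset.range m, f (i : ℤ) := by
  induction m with
  | zero => simp
  | succ m ih =>
    rw [List.range_succ, List.map_append, List.sum_append, Finset.sum_range_succ, ih]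
    simp

lemma pv_sumIco (m : ℕ) (f : ℤ → ℤ) :
    ∑ c ∈ Finset.Ico (0 : ℤ) (m : ℤ), f c = ∑ i ∈ Finset.range m, f (i : ℤ) := by
  rw [← pyRange_map_sum, PySem.List.pyRange_zero_natCast, List.map_map]
  exact pv_sum_range m f

lemma pv_map_sum_getD {α : Type} (l : List α) (d : α) (f : α → ℤ) :
    (l.map f).sum = ∑ i ∈ Finset.range l.length, f (l.getD i d) := by
  induction l with
  | nil => simp
  | cons x xs ih =>
    rw [List.map_cons, List.sum_cons, ih, List.length_cons, Finset.sum_range_succ']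
    simp [add_comm]

lemma pvPairs_eq_mapsum (xs ys : List Int) (k : Int) :
    pvPairs xs ys k = ((xs.zip ys).map (fun p => if p.1 * p.2 = k then (1 : ℤ) else 0)).sum := by
  unfold pvPairs
  rw [show (fun (s : ℤ) (p : ℤ × ℤ) => if p.1 * p.2 = k then s + 1 else s)
      = (fun (s : ℤ) (p : ℤ × ℤ) => s + (if p.1 * p.2 = k then (1 : ℤ) else 0)) from
    funext fun s => funext fun p => by split_ifs <;> ring]
  rw [PySem.List.foldl_add]
  simp

lemma pvPairs_eq_sum (xs ys : List Int) (k : Int) :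
    pvPairs xs ys k = ∑ i ∈ Finset.range (min xs.length ys.length),
      (if xs.getD i 0 * ys.getD i 0 = k then (1 : ℤ) else 0) := by
  rw [pvPairs_eq_mapsum, pv_map_sum_getD _ ((0 : ℤ), (0 : ℤ)) _, List.length_zip]
  refine Finset.sum_congr rfl fun i hi => ?_
  rw [Finset.mem_range] at hi
  have h1 : i < xs.length := lt_of_lt_of_le hi (min_le_left _ _)
  have h2 : i < ys.length := lt_of_lt_of_le hi (min_le_right _ _)
  have hz : (xs.zip ys).getD i (0, 0) = (xs.getD i 0, ys.getD i 0) := by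
    rw [List.getD_eq_getElem _ _ (by rw [List.length_zip]; omega), List.getElem_zip,
      List.getD_eq_getElem _ _ h1, List.getD_eq_getElem _ _ h2]
  rw [hz]

lemma pv_window (a b : List Int) (k : Int) (s t L : ℕ)
    (ha : s + L ≤ a.length) (hb : t + L ≤ b.length) :
    pvPairs ((a.drop s).take L) ((b.drop t).take L) k
      = ∑ i ∈ Finset.range L, (if a.getD (s + i) 0 * b.getD (t + i) 0 = k then (1 : ℤ) else 0) := by
  rw [pvPairs_eq_sum]
  have hla : ((a.drop s).take L).length = L := by simp; omega
  have hlb : ((b.drop t).take L).length = L := by simp; omega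
  rw [hla, hlb, min_self]
  refine Finset.sum_congr rfl fun i hi => ?_
  rw [Finset.mem_range] at hi
  have g : ∀ (l : List Int) (u : ℕ), ((l.drop u).take L).getD i 0 = l.getD (u + i) 0 := by
    intro l u
    rw [List.getD_eq_getElem?_getD, List.getD_eq_getElem?_getD,
      List.getElem?_take_of_lt hi, List.getElem?_drop]
  rw [g a s, g b t]


lemma pv_window0 (a b : List Int) (k : Int) (t L : ℕ)
    (ha : L ≤ a.length) (hb : t + L ≤ b.length) :
    pvPairs (a.take L) ((b.drop t).take L) k
      = ∑ i ∈ Finset.range L, (if a.getD i 0 * b.getD (t + i) 0 = k then (1 : ℤ) else 0) := by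
  have h := pv_window a b k 0 t L (by omega) hb
  rw [List.drop_zero] at h
  simpa using h

lemma pv_window0' (a b : List Int) (k : Int) (s L : ℕ)
    (ha : s + L ≤ a.length) (hb : L ≤ b.length) :
    pvPairs ((a.drop s).take L) (b.take L) k
      = ∑ i ∈ Finset.range L, (if a.getD (s + i) 0 * b.getD i 0 = k then (1 : ℤ) else 0) := by
  have h := pv_window a b k s 0 L ha (by omega)
  rw [List.drop_zero] at h
  simpa using h

lemma pv_get2_eq (T : List (List Int)) (r c : ℕ) :
    pvGet2 T (r : ℤ) (c : ℤ) = (T.getD r []).getD c 0 := by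
  unfold pvGet2
  rw [PySem.List.pyGet?_natCast, PySem.List.pyGet?_natCast,
    ← List.getD_eq_getElem?_getD, ← List.getD_eq_getElem?_getD]

lemma pv_sum_Ico_extend (N M : ℕ) (hMN : M ≤ N) (f : ℤ → ℤ)
    (h0 : ∀ i : ℕ, M ≤ i → i < N → f (i : ℤ) = 0) :
    ∑ c ∈ Finset.Ico (0 : ℤ) (M : ℤ), f c = ∑ c ∈ Finset.Ico (0 : ℤ) (N : ℤ), f c := by
  rw [pv_sumIco, pv_sumIco]
  refine Finset.sum_subset (by intro x hx; rw [Finset.mem_range] at *; omega) fun i hi hni => ?_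
  rw [Finset.mem_range] at hi
  rw [Finset.mem_range] at hni
  exact h0 i (by omega) hi

lemma pv_rows_len (T : List (List Int)) (hrows : ∀ row ∈ T, T.length ≤ row.length)
    (r : ℕ) (hr : r < T.length) : T.length ≤ (T.getD r []).length := by
  refine hrows _ ?_
  rw [List.getD_eq_getElem _ _ hr]
  exact List.getElem_mem _

lemma pv_band_plus (T : List (List Int)) (k : Int)
    (hrows : ∀ row ∈ T, T.length ≤ row.length) (d e : ℕ)
    (he : 0 < e) (heN : e ≤ T.length) (r : ℕ) (hr : r + d < T.length) (hd : 0 < d) :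
    pvPairs ((T.getD r []).take (T.length - e)) (((T.getD (r + d) []).drop e).take (T.length - e)) k
      = ∑ c ∈ Finset.Ico (0 : ℤ) (T.length : ℤ), pvInd T k (r : ℤ) c ((r : ℤ) + (d : ℤ)) (c + (e : ℤ)) := by
  have hla : T.length ≤ (T.getD r []).length := pv_rows_len T hrows r (by omega)
  have hlb : T.length ≤ (T.getD (r + d) []).length := pv_rows_len T hrows (r + d) hr
  rw [pv_window0 _ _ _ e (T.length - e) (by omega) (by omega)]
  rw [← pv_sum_Ico_extend T.length (T.length - e) (by omega) _ ?vanish, pv_sumIco]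
  case vanish =>
    intro i hiM hiN
    unfold pvInd
    rw [if_neg]
    rintro ⟨_, _, _, h4, _⟩
    omega
  symm
  refine Finset.sum_congr rfl fun i hi => ?_
  rw [Finset.mem_range] at hi
  have hga : pvGet2 T (r : ℤ) (i : ℤ) = (T.getD r []).getD i 0 := pv_get2_eq T r i
  have hgb : pvGet2 T ((r : ℤ) + (d : ℤ)) ((i : ℤ) + (e : ℤ)) = (T.getD (r + d) []).getD (e + i) 0 := by
    rw [show ((r : ℤ) + (d : ℤ)) = ((r + d : ℕ) : ℤ) by push_cast; ring,
      show ((i : ℤ) + (e : ℤ)) = ((e + i : ℕ) : ℤ) by push_cast; ring, pv_get2_eq]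
  unfold pvInd
  by_cases hk : (T.getD r []).getD i 0 * (T.getD (r + d) []).getD (e + i) 0 = k
  · rw [if_pos ⟨by omega, by omega, by omega, by omega, by rw [hga, hgb]; exact hk⟩, if_pos hk]
  · rw [if_neg (by rintro ⟨_, _, _, _, h5⟩; rw [hga, hgb] at h5; exact hk h5), if_neg hk]

lemma pv_band_minus (T : List (List Int)) (k : Int)
    (hrows : ∀ row ∈ T, T.length ≤ row.length) (d e : ℕ)
    (he : 0 < e) (heN : e ≤ T.length) (r : ℕ) (hr : r + d < T.length) (hd : 0 < d) :
    pvPairs (((T.getD r []).drop e).take (T.length - e)) ((T.getD (r + d) []).take (T.length - e)) k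
      = ∑ c ∈ Finset.Ico (0 : ℤ) (T.length : ℤ), pvInd T k (r : ℤ) c ((r : ℤ) + (d : ℤ)) (c + -(e : ℤ)) := by
  have hla : T.length ≤ (T.getD r []).length := pv_rows_len T hrows r (by omega)
  have hlb : T.length ≤ (T.getD (r + d) []).length := pv_rows_len T hrows (r + d) hr
  rw [pv_window0' _ _ _ e (T.length - e) (by omega) (by omega)]
  have hz : ∑ i ∈ Finset.Ico 0 e, pvInd T k (r : ℤ) (i : ℤ) ((r : ℤ) + (d : ℤ)) ((i : ℤ) + -(e : ℤ)) = 0 := by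
    refine Finset.sum_eq_zero fun i hi => ?_
    rw [Finset.mem_Ico] at hi
    unfold pvInd
    rw [if_neg]
    rintro ⟨_, _, h3, _, _⟩
    omega
  have hrhs : ∑ c ∈ Finset.Ico (0 : ℤ) (T.length : ℤ), pvInd T k (r : ℤ) c ((r : ℤ) + (d : ℤ)) (c + -(e : ℤ))
      = ∑ i ∈ Finset.range (T.length - e), pvInd T k (r : ℤ) ((e + i : ℕ) : ℤ) ((r : ℤ) + (d : ℤ)) (((e + i : ℕ) : ℤ) + -(e : ℤ)) := by
    rw [pv_sumIco, Finset.range_eq_Ico,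
      ← Finset.sum_Ico_consecutive (fun i : ℕ => pvInd T k (r : ℤ) (i : ℤ) ((r : ℤ) + (d : ℤ)) ((i : ℤ) + -(e : ℤ))) (Nat.zero_le e) heN,
      hz]
    simp only [zero_add]
    rw [Finset.sum_Ico_eq_sum_range (fun c : ℕ => pvInd T k (r : ℤ) (c : ℤ) ((r : ℤ) + (d : ℤ)) ((c : ℤ) + -(e : ℤ))) e T.length]
    rw [Finset.range_eq_Ico]
  rw [hrhs]
  symm
  refine Finset.sum_congr rfl fun i hi => ?_
  rw [Finset.mem_range] at hi
  have hga : pvGet2 T (r : ℤ) ((e + i : ℕ) : ℤ) = (T.getD r []).getD (e + i) 0 := pv_get2_eq T r (e + i)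
  have hgb : pvGet2 T ((r : ℤ) + (d : ℤ)) (((e + i : ℕ) : ℤ) + -(e : ℤ)) = (T.getD (r + d) []).getD i 0 := by
    rw [show ((r : ℤ) + (d : ℤ)) = ((r + d : ℕ) : ℤ) by push_cast; ring,
      show ((((e + i : ℕ) : ℤ)) + -(e : ℤ)) = ((i : ℕ) : ℤ) by push_cast; ring, pv_get2_eq]
  unfold pvInd
  by_cases hk : (T.getD r []).getD (e + i) 0 * (T.getD (r + d) []).getD i 0 = k
  · rw [if_pos ⟨by omega, by omega, by omega, by omega,
      by rw [hga, hgb]; exact hk⟩, if_pos hk]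
  · rw [if_neg (by rintro ⟨_, _, _, _, h5⟩; rw [hga, hgb] at h5; exact hk h5), if_neg hk]

lemma pv_loop1 (T : List (List Int)) (k : Int) (hN : 3 ≤ T.length)
    (hrows : ∀ row ∈ T, T.length ≤ row.length) :
    (PySem.List.pyRange 0 ((T.length : ℤ) - 1) 1).foldl (fun half r =>
      let a := (PySem.List.pyGet? T r).getD []
      let b := (PySem.List.pyGet? T (r + 1)).getD []
      half + pvPairs (PySem.List.slice a none (some ((T.length : ℤ) - 2))) (PySem.List.slice b (some 2) (some (T.length : ℤ))) k
           + pvPairs (PySem.List.slice a (some 2) (some (T.length : ℤ))) (PySem.List.slice b none (some ((T.length : ℤ) - 2))) k) 0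
    = ∑ r ∈ Finset.Ico (0 : ℤ) ((T.length : ℤ) - 1),
        ∑ c ∈ Finset.Ico (0 : ℤ) (T.length : ℤ),
          (pvInd T k r c (r + ((1 : ℕ) : ℤ)) (c + ((2 : ℕ) : ℤ)) + pvInd T k r c (r + ((1 : ℕ) : ℤ)) (c + -((2 : ℕ) : ℤ))) := by
  rw [PySem.List.foldl_congr_mem' _ _
    (fun acc r => acc + ∑ c ∈ Finset.Ico (0 : ℤ) (T.length : ℤ),
      (pvInd T k r c (r + ((1 : ℕ) : ℤ)) (c + ((2 : ℕ) : ℤ)) + pvInd T k r c (r + ((1 : ℕ) : ℤ)) (c + -((2 : ℕ) : ℤ)))) 0 ?_]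
  · rw [PySem.List.foldl_add, pyRange_map_sum]
    simp
  · intro rr hrr acc
    rw [PySem.List.mem_pyRange_one] at hrr
    obtain ⟨hr0, hr1⟩ := hrr
    obtain ⟨rn, rfl⟩ : ∃ rn : ℕ, rr = (rn : ℤ) := ⟨rr.toNat, (Int.toNat_of_nonneg hr0).symm⟩
    dsimp only
    rw [PySem.List.pyGet?_natCast]
    rw [show ((rn : ℤ) + 1) = ((rn + 1 : ℕ) : ℤ) by push_cast; ring, PySem.List.pyGet?_natCast]
    rw [← List.getD_eq_getElem?_getD, ← List.getD_eq_getElem?_getD]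
    rw [show (T.length : ℤ) - 2 = ((T.length - 2 : ℕ) : ℤ) by omega]
    simp only [PySem.List.slice_to_natCast]
    rw [show (2 : ℤ) = ((2 : ℕ) : ℤ) by norm_num]
    simp only [PySem.List.slice_natCast]
    rw [pv_band_plus T k hrows 1 2 (by norm_num) (by omega) rn (by omega) (by norm_num),
      pv_band_minus T k hrows 1 2 (by norm_num) (by omega) rn (by omega) (by norm_num)]
    rw [add_assoc, ← Finset.sum_add_distrib]
lemma pv_loop2 (T : List (List Int)) (k : Int) (hN : 3 ≤ T.length)
    (hrows : ∀ row ∈ T, T.length ≤ row.length) (x : ℤ) :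
    (PySem.List.pyRange 0 ((T.length : ℤ) - 2) 1).foldl (fun half r =>
      let a := (PySem.List.pyGet? T r).getD []
      let b := (PySem.List.pyGet? T (r + 2)).getD []
      half + pvPairs (PySem.List.slice a none (some ((T.length : ℤ) - 1))) (PySem.List.slice b (some 1) (some (T.length : ℤ))) k
           + pvPairs (PySem.List.slice a (some 1) (some (T.length : ℤ))) (PySem.List.slice b none (some ((T.length : ℤ) - 1))) k) x
    = x + ∑ r ∈ Finset.Ico (0 : ℤ) ((T.length : ℤ) - 2),
        ∑ c ∈ Finset.Ico (0 : ℤ) (T.length : ℤ),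
          (pvInd T k r c (r + ((2 : ℕ) : ℤ)) (c + ((1 : ℕ) : ℤ)) + pvInd T k r c (r + ((2 : ℕ) : ℤ)) (c + -((1 : ℕ) : ℤ))) := by
  rw [PySem.List.foldl_congr_mem' _ _
    (fun acc r => acc + ∑ c ∈ Finset.Ico (0 : ℤ) (T.length : ℤ),
      (pvInd T k r c (r + ((2 : ℕ) : ℤ)) (c + ((1 : ℕ) : ℤ)) + pvInd T k r c (r + ((2 : ℕ) : ℤ)) (c + -((1 : ℕ) : ℤ)))) x ?_]
  · rw [PySem.List.foldl_add, pyRange_map_sum]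
  · intro rr hrr acc
    rw [PySem.List.mem_pyRange_one] at hrr
    obtain ⟨hr0, hr1⟩ := hrr
    obtain ⟨rn, rfl⟩ : ∃ rn : ℕ, rr = (rn : ℤ) := ⟨rr.toNat, (Int.toNat_of_nonneg hr0).symm⟩
    dsimp only
    rw [PySem.List.pyGet?_natCast]
    rw [show ((rn : ℤ) + 2) = ((rn + 2 : ℕ) : ℤ) by push_cast; ring, PySem.List.pyGet?_natCast]
    rw [← List.getD_eq_getElem?_getD, ← List.getD_eq_getElem?_getD]
    rw [show (T.length : ℤ) - 1 = ((T.length - 1 : ℕ) : ℤ) by omega]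
    simp only [PySem.List.slice_to_natCast]
    rw [show (1 : ℤ) = ((1 : ℕ) : ℤ) by norm_num]
    simp only [PySem.List.slice_natCast]
    rw [pv_band_plus T k hrows 2 1 (by norm_num) (by omega) rn (by omega) (by norm_num),
      pv_band_minus T k hrows 2 1 (by norm_num) (by omega) rn (by omega) (by norm_num)]
    rw [add_assoc, ← Finset.sum_add_distrib]

lemma solve_alt_eq_sum (T : List (List Int)) (k : Int) (hpre : Pre_solve T k) :
    solve_alt T k = 2 * ∑ r ∈ Finset.Ico (0 : ℤ) (T.length : ℤ),
      ∑ c ∈ Finset.Ico (0 : ℤ) (T.length : ℤ), pvFB T k r c := by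
  rcases (by omega : 3 ≤ T.length ∨ T.length ≤ 2) with hN | hN
  · have hrows : ∀ row ∈ T, T.length ≤ row.length := by
      rcases hpre with h | h
      · omega
      · exact h
    show 2 * ((PySem.List.pyRange 0 ((T.length : ℤ) - 2) 1).foldl (fun half r =>
      let a := (PySem.List.pyGet? T r).getD []
      let b := (PySem.List.pyGet? T (r + 2)).getD []
      half + pvPairs (PySem.List.slice a none (some ((T.length : ℤ) - 1))) (PySem.List.slice b (some 1) (some (T.length : ℤ))) k
           + pvPairs (PySem.List.slice a (some 1) (some (T.length : ℤ))) (PySem.List.slice b none (some ((T.length : ℤ) - 1))) k)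
    ((PySem.List.pyRange 0 ((T.length : ℤ) - 1) 1).foldl (fun half r =>
      let a := (PySem.List.pyGet? T r).getD []
      let b := (PySem.List.pyGet? T (r + 1)).getD []
      half + pvPairs (PySem.List.slice a none (some ((T.length : ℤ) - 2))) (PySem.List.slice b (some 2) (some (T.length : ℤ))) k
           + pvPairs (PySem.List.slice a (some 2) (some (T.length : ℤ))) (PySem.List.slice b none (some ((T.length : ℤ) - 2))) k) 0))
      = 2 * ∑ r ∈ Finset.Ico (0 : ℤ) (T.length : ℤ), ∑ c ∈ Finset.Ico (0 : ℤ) (T.length : ℤ), pvFB T k r c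
    rw [pv_loop2 T k hN hrows, pv_loop1 T k hN hrows]
    rw [show (T.length : ℤ) - 1 = ((T.length - 1 : ℕ) : ℤ) by omega]
    rw [show (T.length : ℤ) - 2 = ((T.length - 2 : ℕ) : ℤ) by omega]
    rw [pv_sum_Ico_extend T.length (T.length - 1) (by omega) _ ?v1]
    rw [pv_sum_Ico_extend T.length (T.length - 2) (by omega) _ ?v2]
    case v1 =>
      intro i hiM hiN
      refine Finset.sum_eq_zero fun c hc => ?_
      unfold pvInd
      rw [if_neg (by rintro ⟨_, h2, _, _, _⟩; push_cast at h2; omega),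
        if_neg (by rintro ⟨_, h2, _, _, _⟩; push_cast at h2; omega)]
      norm_num
    case v2 =>
      intro i hiM hiN
      refine Finset.sum_eq_zero fun c hc => ?_
      unfold pvInd
      rw [if_neg (by rintro ⟨_, h2, _, _, _⟩; push_cast at h2; omega),
        if_neg (by rintro ⟨_, h2, _, _, _⟩; push_cast at h2; omega)]
      norm_num
    rw [← Finset.sum_add_distrib]
    congr 1
    refine Finset.sum_congr rfl fun r _ => ?_
    rw [← Finset.sum_add_distrib]
    refine Finset.sum_congr rfl fun c _ => ?_
    unfold pvFB
    push_cast
    ring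
  · have hrhs : ∑ r ∈ Finset.Ico (0 : ℤ) (T.length : ℤ),
        ∑ c ∈ Finset.Ico (0 : ℤ) (T.length : ℤ), pvFB T k r c = 0 := by
      refine Finset.sum_eq_zero fun r hr => Finset.sum_eq_zero fun c hc => ?_
      rw [Finset.mem_Ico] at hr hc
      unfold pvFB pvInd
      rw [if_neg (by rintro ⟨h1, h2, h3, h4, _⟩; omega),
        if_neg (by rintro ⟨h1, h2, h3, h4, _⟩; omega),
        if_neg (by rintro ⟨h1, h2, h3, h4, _⟩; omega),
        if_neg (by rintro ⟨h1, h2, h3, h4, _⟩; omega)]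
      norm_num
    rw [hrhs]
    show 2 * ((PySem.List.pyRange 0 ((T.length : ℤ) - 2) 1).foldl (fun half r =>
      let a := (PySem.List.pyGet? T r).getD []
      let b := (PySem.List.pyGet? T (r + 2)).getD []
      half + pvPairs (PySem.List.slice a none (some ((T.length : ℤ) - 1))) (PySem.List.slice b (some 1) (some (T.length : ℤ))) k
           + pvPairs (PySem.List.slice a (some 1) (some (T.length : ℤ))) (PySem.List.slice b none (some ((T.length : ℤ) - 1))) k)
    ((PySem.List.pyRange 0 ((T.length : ℤ) - 1) 1).foldl (fun half r =>
      let a := (PySem.List.pyGet? T r).getD []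
      let b := (PySem.List.pyGet? T (r + 1)).getD []
      half + pvPairs (PySem.List.slice a none (some ((T.length : ℤ) - 2))) (PySem.List.slice b (some 2) (some (T.length : ℤ))) k
           + pvPairs (PySem.List.slice a (some 2) (some (T.length : ℤ))) (PySem.List.slice b none (some ((T.length : ℤ) - 2))) k) 0)) = 2 * 0
    rcases (by omega : T.length ≤ 1 ∨ T.length = 2) with h1 | h2
    · rw [PySem.List.pyRange_one_eq_nil (show (T.length : ℤ) - 1 ≤ 0 by omega),
        PySem.List.pyRange_one_eq_nil (show (T.length : ℤ) - 2 ≤ 0 by omega)]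
      simp
    · have hp0 : ∀ x y : List Int, pvPairs (PySem.List.slice x none (some 0)) y k = 0 := by
        intro x y
        rw [PySem.List.slice_to _ (le_refl (0 : ℤ))]
        simp [pvPairs]
      have hp0' : ∀ x y : List Int, pvPairs y (PySem.List.slice x none (some 0)) k = 0 := by
        intro x y
        rw [PySem.List.slice_to _ (le_refl (0 : ℤ))]
        simp [pvPairs, List.zip_nil_right]
      rw [show (T.length : ℤ) = 2 by omega]
      rw [show (2 : ℤ) - 1 = 1 by norm_num, show (2 : ℤ) - 2 = 0 by norm_num]
      rw [show PySem.List.pyRange (0 : ℤ) 1 1 = [0] from by decide,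
        PySem.List.pyRange_one_eq_nil (le_refl (0 : ℤ))]
      simp only [List.foldl_cons, List.foldl_nil]
      rw [hp0, hp0']
      norm_num

lemma solve_eq_solve_alt (T : List (List Int)) (k : Int) (hpre : Pre_solve T k) :
    solve T k = solve_alt T k := by
  rw [solve_eq_sum, solve_alt_eq_sum T k hpre, ← Finset.sum_product', ← Finset.sum_product']
  simp only [pvFA, pvFB, Finset.sum_add_distrib]
  have hA1 : (∑ p ∈ Finset.Ico (0 : ℤ) (T.length : Int) ×ˢ Finset.Ico (0 : ℤ) (T.length : Int), pvInd T k p.1 p.2 (p.1 - 1) (p.2 - 2)) = pvS T k (-1) (-2) := by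
    unfold pvS
    refine Finset.sum_congr rfl fun p _ => ?_
    rw [show (p.1 - 1) = p.1 + (-1) by ring, show (p.2 - 2) = p.2 + (-2) by ring]
  have hA2 : (∑ p ∈ Finset.Ico (0 : ℤ) (T.length : Int) ×ˢ Finset.Ico (0 : ℤ) (T.length : Int), pvInd T k p.1 p.2 (p.1 - 1) (p.2 + 2)) = pvS T k (-1) (2) := by
    unfold pvS
    refine Finset.sum_congr rfl fun p _ => ?_
    rw [show (p.1 - 1) = p.1 + (-1) by ring, show (p.2 + 2) = p.2 + (2) by ring]
  have hA3 : (∑ p ∈ Finset.Ico (0 : ℤ) (T.length : Int) ×ˢ Finset.Ico (0 : ℤ) (T.length : Int), pvInd T k p.1 p.2 (p.1 - 2) (p.2 - 1)) = pvS T k (-2) (-1) := by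
    unfold pvS
    refine Finset.sum_congr rfl fun p _ => ?_
    rw [show (p.1 - 2) = p.1 + (-2) by ring, show (p.2 - 1) = p.2 + (-1) by ring]
  have hA4 : (∑ p ∈ Finset.Ico (0 : ℤ) (T.length : Int) ×ˢ Finset.Ico (0 : ℤ) (T.length : Int), pvInd T k p.1 p.2 (p.1 + 2) (p.2 - 1)) = pvS T k (2) (-1) := by
    unfold pvS
    refine Finset.sum_congr rfl fun p _ => ?_
    rw [show (p.1 + 2) = p.1 + (2) by ring, show (p.2 - 1) = p.2 + (-1) by ring]
  have hA5 : (∑ p ∈ Finset.Ico (0 : ℤ) (T.length : Int) ×ˢ Finset.Ico (0 : ℤ) (T.length : Int), pvInd T k p.1 p.2 (p.1 - 2) (p.2 + 1)) = pvS T k (-2) (1) := by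
    unfold pvS
    refine Finset.sum_congr rfl fun p _ => ?_
    rw [show (p.1 - 2) = p.1 + (-2) by ring, show (p.2 + 1) = p.2 + (1) by ring]
  have hA6 : (∑ p ∈ Finset.Ico (0 : ℤ) (T.length : Int) ×ˢ Finset.Ico (0 : ℤ) (T.length : Int), pvInd T k p.1 p.2 (p.1 + 2) (p.2 + 1)) = pvS T k (2) (1) := by
    unfold pvS
    refine Finset.sum_congr rfl fun p _ => ?_
    rw [show (p.1 + 2) = p.1 + (2) by ring, show (p.2 + 1) = p.2 + (1) by ring]
  have hA7 : (∑ p ∈ Finset.Ico (0 : ℤ) (T.length : Int) ×ˢ Finset.Ico (0 : ℤ) (T.length : Int), pvInd T k p.1 p.2 (p.1 + 1) (p.2 - 2)) = pvS T k (1) (-2) := by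
    unfold pvS
    refine Finset.sum_congr rfl fun p _ => ?_
    rw [show (p.1 + 1) = p.1 + (1) by ring, show (p.2 - 2) = p.2 + (-2) by ring]
  have hA8 : (∑ p ∈ Finset.Ico (0 : ℤ) (T.length : Int) ×ˢ Finset.Ico (0 : ℤ) (T.length : Int), pvInd T k p.1 p.2 (p.1 + 1) (p.2 + 2)) = pvS T k (1) (2) := by
    unfold pvS
    refine Finset.sum_congr rfl fun p _ => ?_
    rw [show (p.1 + 1) = p.1 + (1) by ring, show (p.2 + 2) = p.2 + (2) by ring]
  have hN_1_2 : pvS T k (-(1)) (-(2)) = pvS T k (1) (2) := (pvS_neg T k (1) (2)).symm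
  have hN_1_m2 : pvS T k (-(1)) (-(-2)) = pvS T k (1) (-2) := (pvS_neg T k (1) (-2)).symm
  have hN_2_1 : pvS T k (-(2)) (-(1)) = pvS T k (2) (1) := (pvS_neg T k (2) (1)).symm
  have hN_2_m1 : pvS T k (-(2)) (-(-1)) = pvS T k (2) (-1) := (pvS_neg T k (2) (-1)).symm
  rw [hA1, hA2, hA3, hA4, hA5, hA6, hA7, hA8]
  have g1 : pvS T k (-1) (-2) = pvS T k 1 2 := by simpa using hN_1_2
  have g2 : pvS T k (-1) 2 = pvS T k 1 (-2) := by simpa using hN_1_m2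
  have g3 : pvS T k (-2) (-1) = pvS T k 2 1 := by simpa using hN_2_1
  have g4 : pvS T k (-2) 1 = pvS T k 2 (-1) := by simpa using hN_2_m1
  rw [g1, g2, g3, g4]
  show _ = 2 * (pvS T k 1 2 + pvS T k 1 (-2) + pvS T k 2 1 + pvS T k 2 (-1))
  ring

-- ===== VERDICT (by name: the statement is the Claim_ definition above) =====
theorem solve_spec : Claim_equal_solve := by
  intro T k _ hpre
  show solve T k = solve_alt T k
  exact solve_eq_solve_alt T k hpre
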